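-- pv_equiv track=rewrite | github.com/ufkapano/graphtheory | graphtheory/permutations/circletools.py | circle2perm
-- ===== SOURCE A (Python) =====
-- def circle2perm(double_perm):
--     """From double perm to perm for perm graphs.
--     Note that if this test failed then the corresponding abstract graph
--     still can be a perm graph but harder to detect.
--     """
--     window = set()
--     start_idx = -1   # nieprawidlowy index na starcie, poczatek okna
--     n = len(double_perm) // 2   # liczba wierzcholkow
--     for i in range(n):   # make initial window, O(n) time
--         node = double_perm[i]
--         if node in window:
--             window.remove(node)
--         else:
--             window.add(node)
--     if len(window) == n:
--         start_idx = 0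
--     else:   # Przesuwamy okno. Z lewej wychodza, z prawej wchodza.
--         for i in range(n):   # O(n) time
--             node = double_perm[i]   # node wychodzacy z okna
--             if node in window:
--                 window.remove(node)
--             else:
--                 window.add(node)
--             node = double_perm[i+n]   # node wchodzacy do okna
--             if node in window:
--                 window.remove(node)
--             else:
--                 window.add(node)
--             if len(window) == n:
--                 start_idx = i+1
--                 break
--     if start_idx == -1:
--         raise ValueError("perm graph not detected")
--     # Buduje slowniki.
--     label2number = dict()
--     number2label = dict()
--     for i in range(n):
--         label2number[double_perm[start_idx+i]] = i
--         number2label[i] = double_perm[start_idx+i]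
--     # Buduje permutacje.
--     perm = [label2number[double_perm[(start_idx+n+i) % (2*n)]] for i in range(n)]
--     perm.reverse()
--     return perm, number2label, label2number
-- ===== SOURCE B (Python) =====
-- def circle2perm(double_perm):
--     """From double perm to perm for perm graphs.
--
--     Instead of maintaining a sliding parity set, scan the candidate
--     start positions directly: the window starting at s is valid exactly
--     when its n labels are pairwise distinct.
--     """
--     n = len(double_perm) // 2
--     start_idx = None
--     for s in range(n + 1):
--         if len(set(double_perm[s:s + n])) == n:
--             start_idx = s
--             break
--     if start_idx is None:
--         raise ValueError("perm graph not detected")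
--     window = double_perm[start_idx:start_idx + n]
--     label2number = {label: i for i, label in enumerate(window)}
--     number2label = {i: label for i, label in enumerate(window)}
--     perm = [label2number[double_perm[(start_idx + n + i) % (2 * n)]]
--             for i in reversed(range(n))]
--     return perm, number2label, label2number
-- ===== Notes on version B (the rewrite author's own statement) =====
-- stated objective: simpler
-- what changed: Replaces A's O(n) incremental sliding parity-set window (toggle out-left/in-right with a break) by a direct scan of candidate start positions that tests each n-slice for distinctness with len(set(slice)) == n, and builds the two dicts by comprehensions over the window and the permutation back-to-front without a final reverse.
import Mathlib
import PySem

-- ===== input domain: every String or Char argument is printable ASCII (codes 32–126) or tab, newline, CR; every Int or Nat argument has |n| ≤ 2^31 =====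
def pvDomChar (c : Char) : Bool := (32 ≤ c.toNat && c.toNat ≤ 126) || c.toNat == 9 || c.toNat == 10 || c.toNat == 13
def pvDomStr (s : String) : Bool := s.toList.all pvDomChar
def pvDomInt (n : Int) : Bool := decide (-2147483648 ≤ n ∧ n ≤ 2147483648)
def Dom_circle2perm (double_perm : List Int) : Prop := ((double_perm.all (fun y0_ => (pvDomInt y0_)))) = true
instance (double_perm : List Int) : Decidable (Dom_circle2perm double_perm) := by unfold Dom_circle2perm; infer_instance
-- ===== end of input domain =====

-- B replaces A's O(n) sliding parity-set window scan by a direct per-candidate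
-- distinctness test on the slice (simpler; asymptotically slower, O(n^2)).
-- Equivalence is about the RETURN value; Pre_ excludes exactly the inputs where
-- the Python A raises (ValueError / KeyError).

-- ===== PORT A =====
-- Python set → PySem.Set; the result only uses membership and len, never iteration order.
def c2pToggle (w : PySem.Set Int) (x : Int) : PySem.Set Int :=
  if x ∈ w then PySem.Set.discard w x else PySem.Set.add w x

-- the sliding loop with break; indices of `for i in range(n)` are the Nat list
-- List.range n (all indexing is nonnegative and in range on every reached path,
-- so dp[i] is ported as dp.getD i 0 — exact there).
def c2pSlide (dp : List Int) (n : Nat) : PySem.Set Int → List Nat → Option Nat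
  | _, [] => none
  | w, i :: rest =>
    let w1 := c2pToggle w (dp.getD i 0)
    let w2 := c2pToggle w1 (dp.getD (i + n) 0)
    if w2.length = n then some (i + 1) else c2pSlide dp n w2 rest

def circle2perm (double_perm : List Int) : List Int × (List (Int × Int)) × (List (Int × Int)) :=
  let n := double_perm.length / 2
  let w := (List.range n).foldl (fun w i => c2pToggle w (double_perm.getD i 0)) []
  let start? : Option Nat :=
    if w.length = n then some 0 else c2pSlide double_perm n w (List.range n)
  match start? with
  | none => ([], [], [])  -- Python raises ValueError here; outside Pre_
  | some s =>
    let ds := (List.range n).foldl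
      (fun (p : PySem.Dict Int Int × PySem.Dict Int Int) i =>
        (p.1.insert (double_perm.getD (s + i) 0) (i : Int),
         p.2.insert (i : Int) (double_perm.getD (s + i) 0)))
      (PySem.Dict.empty, PySem.Dict.empty)
    let perm := (List.range n).map
      (fun i => PySem.Dict.getD ds.1 (double_perm.getD ((s + n + i) % (2 * n)) 0) 0)
    (perm.reverse, ds.2.items, ds.1.items)

-- ===== PORT B =====
def circle2perm_alt (double_perm : List Int) : List Int × (List (Int × Int)) × (List (Int × Int)) :=
  let n := double_perm.length / 2
  let start? := (List.range (n + 1)).find? (fun s : Nat =>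
    (PySem.Set.ofList (PySem.List.slice double_perm (some (s : Int)) (some ((s : Int) + (n : Int))))).length == n)
  match start? with
  | none => ([], [], [])  -- Python raises ValueError here; outside Pre_
  | some s =>
    let window := PySem.List.slice double_perm (some (s : Int)) (some ((s : Int) + (n : Int)))
    let l2n := (PySem.List.enumerate window 0).foldl
      (fun (d : PySem.Dict Int Int) p => d.insert p.2 p.1) PySem.Dict.empty
    let n2l := (PySem.List.enumerate window 0).foldl
      (fun (d : PySem.Dict Int Int) p => d.insert p.1 p.2) PySem.Dict.empty
    let perm := (List.range n).reverse.map
      (fun i : Nat => PySem.Dict.getD l2n (double_perm.getD ((s + n + i) % (2 * n)) 0) 0)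
    (perm, n2l.items, l2n.items)

-- ===== PRECONDITION & SPEC =====
-- Pre_ holds exactly where the Python A returns: some window of n consecutive
-- labels is pairwise distinct (else ValueError), and — for the FIRST such
-- window, the one the scan picks — every label read when building the
-- permutation belongs to that window (else KeyError).
def Pre_circle2perm (double_perm : List Int) : Prop :=
  ∃ s, s < double_perm.length / 2 + 1 ∧
    ((double_perm.drop s).take (double_perm.length / 2)).Nodup ∧
    (∀ t, t < s → ¬ ((double_perm.drop t).take (double_perm.length / 2)).Nodup) ∧
    (∀ x ∈ (double_perm.take (2 * (double_perm.length / 2))).take s ++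
           (double_perm.take (2 * (double_perm.length / 2))).drop (s + double_perm.length / 2),
      x ∈ (double_perm.drop s).take (double_perm.length / 2))
instance (double_perm : List Int) : Decidable (Pre_circle2perm double_perm) := by
  unfold Pre_circle2perm; infer_instance
def pvWitness_circle2perm : List Int := [1, 2, 1, 2]

def Spec_circle2perm (double_perm : List Int) (out : List Int × (List (Int × Int)) × (List (Int × Int))) : Prop := out = circle2perm_alt double_perm
instance (double_perm : List Int) (out : List Int × (List (Int × Int)) × (List (Int × Int))) : Decidable (Spec_circle2perm double_perm out) := by unfold Spec_circle2perm; infer_instance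

-- ===== CLAIM (what is proved, stated in full; the proofs are below) =====
def Claim_equal_circle2perm : Prop := ∀ (double_perm : List Int), Dom_circle2perm double_perm → Pre_circle2perm double_perm → Spec_circle2perm double_perm (circle2perm double_perm)

-- ===== LEMMAS AND PROOFS =====

-- the window slice starting at s, and the validity test both scans implement
def c2pSl (dp : List Int) (s : Nat) : List Int := (dp.drop s).take (dp.length / 2)
def c2pQ (dp : List Int) (s : Nat) : Bool := decide ((c2pSl dp s).Nodup)

theorem c2p_mem_toggle (w : PySem.Set Int) (x y : Int) :
    y ∈ c2pToggle w x ↔ Xor' (y ∈ w) (x = y) := by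
  unfold c2pToggle
  by_cases hx : x ∈ w
  · simp only [hx, if_true, PySem.Set.mem_discard]
    constructor
    · rintro ⟨h1, h2⟩; exact Or.inl ⟨h1, fun he => h2 he.symm⟩
    · rintro (⟨h1, h2⟩ | ⟨h1, h2⟩)
      · exact ⟨h1, fun he => h2 he.symm⟩
      · subst h1; exact absurd hx h2
  · simp only [hx, if_false]
    rw [PySem.Set.add_of_not_mem hx]
    simp only [List.mem_append, List.mem_singleton]
    constructor
    · rintro (h | h)
      · exact Or.inl ⟨h, fun he => hx (he ▸ h)⟩
      · exact Or.inr ⟨h.symm, fun hw => hx (h ▸ hw)⟩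
    · rintro (⟨h, _⟩ | ⟨h, _⟩)
      · exact Or.inl h
      · exact Or.inr h.symm

theorem c2p_nodup_toggle (w : PySem.Set Int) (x : Int) (h : w.Nodup) :
    (c2pToggle w x).Nodup := by
  unfold c2pToggle; split
  · exact PySem.Set.nodup_discard w x h
  · exact PySem.Set.nodup_add w x h

theorem c2p_nodup_foldl (l : List Int) : ∀ (w : PySem.Set Int), w.Nodup →
    (l.foldl c2pToggle w).Nodup := by
  induction l with
  | nil => intro w h; exact h
  | cons a t ih => intro w h; exact ih _ (c2p_nodup_toggle w a h)

theorem c2p_mem_foldl (l : List Int) : ∀ (w : PySem.Set Int) (y : Int),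
    (y ∈ l.foldl c2pToggle w) ↔ Xor' (y ∈ w) (Odd (l.count y)) := by
  induction l with
  | nil => intro w y; simp [Xor']
  | cons a t ih =>
    intro w y
    rw [List.foldl_cons, ih, c2p_mem_toggle]
    have hc : (a :: t).count y = t.count y + (if a = y then 1 else 0) := by
      simp [List.count_cons]
    rw [hc]
    by_cases hay : a = y <;> simp [hay, Nat.odd_add_one, Xor'] <;> tauto

theorem c2p_card_len_nodup (l : List Int) (h : l.toFinset.card = l.length) : l.Nodup := by
  have hd1 : l.dedup.Nodup := List.nodup_dedup l
  have hd2 : l.dedup.toFinset = l.toFinset := by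
    ext y; simp [List.mem_toFinset, List.mem_dedup]
  have hd3 : l.dedup.length = l.toFinset.card := by
    rw [← hd2]; exact (List.toFinset_card_of_nodup hd1).symm
  have : l.dedup = l := (List.dedup_sublist l).eq_of_length (by omega)
  rw [← this]; exact hd1

theorem c2p_len_iff (l : List Int) (w : PySem.Set Int) (hw : w.Nodup)
    (hm : ∀ y, y ∈ w ↔ Odd (l.count y)) : (w.length = l.length ↔ l.Nodup) := by
  constructor
  · intro hlen
    have hsub : ∀ y ∈ w, y ∈ l := by
      intro y hy
      rcases (hm y).mp hy with ⟨k, hk⟩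
      exact List.count_pos_iff.mp (by omega)
    have h1 : w.toFinset.card = w.length := List.toFinset_card_of_nodup hw
    have h2 : w.toFinset ⊆ l.toFinset := by
      intro y hy; rw [List.mem_toFinset] at hy ⊢; exact hsub y hy
    have h3 : w.toFinset.card ≤ l.toFinset.card := Finset.card_le_card h2
    have h4 : l.toFinset.card ≤ l.length := List.toFinset_card_le l
    exact c2p_card_len_nodup l (by omega)
  · intro hnd
    have hext : ∀ y, y ∈ w ↔ y ∈ l := by
      intro y; rw [hm y]
      constructor
      · rintro ⟨k, hk⟩; exact List.count_pos_iff.mp (by omega)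
      · intro hmem; rw [List.count_eq_one_of_mem hnd hmem]; exact odd_one
    exact ((List.perm_ext_iff_of_nodup hw hnd).mpr hext).length_eq

theorem c2p_ofList_len (l : List Int) :
    (PySem.Set.ofList l).length = l.toFinset.card := by
  have h1 := PySem.Set.nodup_ofList (α := Int) l
  have h2 : (PySem.Set.ofList l).toFinset = l.toFinset := by
    ext y; simp [List.mem_toFinset, PySem.Set.mem_ofList]
  rw [← List.toFinset_card_of_nodup h1, h2]

theorem c2p_ofList_len_iff (l : List Int) :
    ((PySem.Set.ofList l).length = l.length ↔ l.Nodup) := by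
  rw [c2p_ofList_len]
  constructor
  · exact c2p_card_len_nodup l
  · exact List.toFinset_card_of_nodup

theorem c2p_sl_length (dp : List Int) (s : Nat) (h : s ≤ dp.length / 2) :
    (c2pSl dp s).length = dp.length / 2 := by
  simp only [c2pSl, List.length_take, List.length_drop]
  omega

theorem c2p_map_range_getD (dp : List Int) (s n : Nat) (h : s + n ≤ dp.length) :
    (List.range n).map (fun i => dp.getD (s + i) 0) = (dp.drop s).take n := by
  apply List.ext_getElem
  · simp only [List.length_map, List.length_range, List.length_take, List.length_drop]
    omega
  · intro i h1 h2
    simp only [List.length_map, List.length_range] at h1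
    rw [List.getElem_map, List.getElem_range, List.getElem_take, List.getElem_drop,
      List.getD_eq_getElem dp 0 (by omega)]

theorem c2p_char_step (dp : List Int) (w : PySem.Set Int) (j : Nat)
    (hj : j < dp.length / 2)
    (hm : ∀ y, y ∈ w ↔ Odd ((c2pSl dp j).count y)) (y : Int) :
    y ∈ c2pToggle (c2pToggle w (dp.getD j 0)) (dp.getD (j + dp.length / 2) 0) ↔
      Odd ((c2pSl dp (j + 1)).count y) := by
  have hlen : 2 * (dp.length / 2) ≤ dp.length := by omega
  have hjlen : j < dp.length := by omega
  have hjn : j + dp.length / 2 < dp.length := by omega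
  have hdA : c2pSl dp j = dp.getD j 0 :: (dp.drop (j + 1)).take (dp.length / 2 - 1) := by
    unfold c2pSl
    rw [List.drop_eq_getElem_cons hjlen, List.getD_eq_getElem dp 0 hjlen]
    conv_lhs => rw [show dp.length / 2 = (dp.length / 2 - 1) + 1 from by omega]
    rw [List.take_succ_cons]
  have hdB : c2pSl dp (j + 1) =
      (dp.drop (j + 1)).take (dp.length / 2 - 1) ++ [dp.getD (j + dp.length / 2) 0] := by
    unfold c2pSl
    have hlt : dp.length / 2 - 1 < (dp.drop (j + 1)).length := by
      rw [List.length_drop]; omega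
    have hg : dp.getD (j + dp.length / 2) 0 = (dp.drop (j + 1))[dp.length / 2 - 1] := by
      simp only [List.getElem_drop]
      rw [List.getD_eq_getElem dp 0 hjn]
      congr 1
      omega
    rw [hg, ← List.concat_eq_append, List.take_concat_get hlt]
    congr 1
    omega
  rw [c2p_mem_toggle, c2p_mem_toggle, hm y, hdA, hdB, List.count_cons, List.count_append,
    List.count_cons, List.count_nil]
  simp only [beq_iff_eq]
  set A := dp.getD j 0 with hA
  set B := dp.getD (j + dp.length / 2) 0 with hB
  by_cases ha : A = y <;> by_cases hb : B = y <;>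
    simp [ha, hb, Nat.odd_add_one, Xor'] <;> tauto

theorem c2p_find?_congr {α : Type} (p q : α → Bool) (l : List α)
    (h : ∀ a ∈ l, p a = q a) : l.find? p = l.find? q := by
  induction l with
  | nil => rfl
  | cons a t ih =>
    rw [List.find?_cons, List.find?_cons, h a List.mem_cons_self]
    cases hqa : q a
    · exact ih fun b hb => h b (List.mem_cons_of_mem _ hb)
    · rfl

theorem c2p_q_iff (dp : List Int) (s : Nat) (w : PySem.Set Int) (hs : s ≤ dp.length / 2)
    (hw : w.Nodup) (hm : ∀ y, y ∈ w ↔ Odd ((c2pSl dp s).count y)) :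
    (w.length = dp.length / 2 ↔ c2pQ dp s = true) := by
  rw [c2pQ, decide_eq_true_iff, ← c2p_len_iff (c2pSl dp s) w hw hm, c2p_sl_length dp s hs]

theorem c2p_slide_eq (dp : List Int) : ∀ (k j : Nat) (w : PySem.Set Int),
    j + k = dp.length / 2 → w.Nodup → (∀ y, y ∈ w ↔ Odd ((c2pSl dp j).count y)) →
    c2pSlide dp (dp.length / 2) w (List.range' j k) =
      (List.range' (j + 1) k).find? (c2pQ dp) := by
  intro k
  induction k with
  | zero => intro j w _ _ _; rfl
  | succ k ih =>
    intro j w hjk hw hm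
    rw [List.range'_succ, List.range'_succ]
    simp only [c2pSlide]
    have hj : j < dp.length / 2 := by omega
    have hchar := c2p_char_step dp w j hj hm
    have hw2 : (c2pToggle (c2pToggle w (dp.getD j 0)) (dp.getD (j + dp.length / 2) 0)).Nodup :=
      c2p_nodup_toggle _ _ (c2p_nodup_toggle _ _ hw)
    have hiff := c2p_q_iff dp (j + 1) _ (by omega) hw2 hchar
    rw [List.find?_cons]
    cases hq : c2pQ dp (j + 1)
    · have : ¬ (c2pToggle (c2pToggle w (dp.getD j 0)) (dp.getD (j + dp.length / 2) 0)).length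
          = dp.length / 2 := fun h => by rw [hiff] at h; exact absurd h (by simp [hq])
      rw [if_neg this]
      exact ih (j + 1) _ (by omega) hw2 hchar
    · rw [if_pos (hiff.mpr hq)]

theorem c2p_init_fold (dp : List Int) :
    (List.range (dp.length / 2)).foldl (fun w i => c2pToggle w (dp.getD i 0)) [] =
      (c2pSl dp 0).foldl c2pToggle [] := by
  rw [← List.foldl_map (f := fun i => dp.getD i 0) (g := c2pToggle)]
  congr 1
  have h0 : (List.range (dp.length / 2)).map (fun i => dp.getD i 0) =
      (List.range (dp.length / 2)).map (fun i => dp.getD (0 + i) 0) := by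
    simp
  rw [h0, c2p_map_range_getD dp 0 (dp.length / 2) (by omega)]
  simp [c2pSl]

theorem c2p_startA (dp : List Int) :
    (if ((List.range (dp.length / 2)).foldl (fun w i => c2pToggle w (dp.getD i 0)) []).length
        = dp.length / 2
     then some 0
     else c2pSlide dp (dp.length / 2)
       ((List.range (dp.length / 2)).foldl (fun w i => c2pToggle w (dp.getD i 0)) [])
       (List.range (dp.length / 2))) =
    (List.range (dp.length / 2 + 1)).find? (c2pQ dp) := by
  have hinit := c2p_init_fold dp
  have hw0 : ((c2pSl dp 0).foldl c2pToggle ([] : PySem.Set Int)).Nodup :=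
    c2p_nodup_foldl _ _ List.nodup_nil
  have hm0 : ∀ y, y ∈ (c2pSl dp 0).foldl c2pToggle ([] : PySem.Set Int) ↔
      Odd ((c2pSl dp 0).count y) := by
    intro y
    rw [c2p_mem_foldl]
    simp [Xor']
  have hiff := c2p_q_iff dp 0 _ (by omega) hw0 hm0
  rw [List.range_eq_range' (n := dp.length / 2 + 1), List.range'_succ, List.find?_cons, hinit]
  cases hq : c2pQ dp 0
  · have : ¬ ((c2pSl dp 0).foldl c2pToggle ([] : PySem.Set Int)).length = dp.length / 2 :=
      fun h => by rw [hiff] at h; exact absurd h (by simp [hq])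
    rw [if_neg this, List.range_eq_range' (n := dp.length / 2)]
    exact c2p_slide_eq dp (dp.length / 2) 0 _ (by omega) hw0 hm0
  · rw [if_pos (hiff.mpr hq)]

theorem c2p_startB (dp : List Int) :
    ((List.range (dp.length / 2 + 1)).find? (fun s : Nat =>
      (PySem.Set.ofList (PySem.List.slice dp (some (s : Int))
        (some ((s : Int) + ((dp.length / 2 : Nat) : Int))))).length == dp.length / 2)) =
    (List.range (dp.length / 2 + 1)).find? (c2pQ dp) := by
  apply c2p_find?_congr
  intro s hs
  rw [List.mem_range] at hs
  rw [PySem.List.slice_natCast_add]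
  have hsl : (dp.drop s).take (dp.length / 2) = c2pSl dp s := rfl
  rw [hsl]
  have hlen : (c2pSl dp s).length = dp.length / 2 := c2p_sl_length dp s (by omega)
  have hiff := c2p_ofList_len_iff (c2pSl dp s)
  rw [hlen] at hiff
  cases hq : c2pQ dp s
  · have hnd : ¬ (c2pSl dp s).Nodup := by
      rw [c2pQ, decide_eq_false_iff_not] at hq; exact hq
    have : ¬ (PySem.Set.ofList (c2pSl dp s)).length = dp.length / 2 :=
      fun h => hnd (hiff.mp h)
    simp [this]
  · rw [c2pQ, decide_eq_true_iff] at hq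
    simp [hiff.mpr hq]

theorem c2p_enumerate_map_range (f : Nat → Int) (n : Nat) :
    PySem.List.enumerate ((List.range n).map f) 0 =
      (List.range n).map (fun i : Nat => ((i : Int), f i)) := by
  apply List.ext_getElem?
  intro k
  rw [PySem.List.getElem?_enumerate]
  by_cases hk : k < n
  · simp [List.getElem?_map, List.getElem?_range, hk]
  · have h1 : ((List.range n).map f).length ≤ k := by simp; omega
    have h2 : ((List.range n).map (fun i : Nat => ((i : Int), f i))).length ≤ k := by simp; omega
    rw [List.getElem?_eq_none h1, List.getElem?_eq_none h2]
    rfl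

theorem c2p_ports_eq (dp : List Int) : circle2perm dp = circle2perm_alt dp := by
  unfold circle2perm circle2perm_alt
  dsimp only []
  rw [c2p_startA dp, c2p_startB dp]
  cases hC : (List.range (dp.length / 2 + 1)).find? (c2pQ dp) with
  | none => rfl
  | some s =>
    have hs : s < dp.length / 2 + 1 := List.mem_range.mp (List.mem_of_find?_eq_some hC)
    have hle : s + dp.length / 2 ≤ dp.length := by omega
    dsimp only
    rw [PySem.List.foldl_prod_mk
      (fun (d : PySem.Dict Int Int) (i : Nat) => d.insert (dp.getD (s + i) 0) (i : Int))
      (fun (d : PySem.Dict Int Int) (i : Nat) => d.insert (i : Int) (dp.getD (s + i) 0))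
      (List.range (dp.length / 2)) PySem.Dict.empty PySem.Dict.empty]
    simp only [PySem.List.slice_natCast_add]
    rw [← c2p_map_range_getD dp s (dp.length / 2) hle]
    rw [c2p_enumerate_map_range]
    simp only [List.foldl_map, List.map_reverse]

-- ===== VERDICT (by name: the statement is the Claim_ definition above) =====
theorem circle2perm_spec : Claim_equal_circle2perm := by
  intro dp _ _
  unfold Spec_circle2perm
  exact c2p_ports_eq dp
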